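-- pv_equiv track=rewrite | github.com/ING-LENIN/seguimientoDosAnalisisAlgoritmos | parteUnoProyectoComplemento/codeEjecutionComplete/todoAutors.py | pigeonhole_sort
-- ===== SOURCE A (Python) =====
-- def pigeonhole_sort(entries, authors):
--     # Crear un diccionario para almacenar las entradas por autor
--     author_dict = {}
--
--     for entry, author in zip(entries, authors):
--         if author not in author_dict:
--             author_dict[author] = []
--         author_dict[author].append(entry)
--
--     # Construir el array ordenado
--     sorted_entries = []
--     for author in sorted(author_dict.keys()):  # Ordenar las claves (autores)
--         sorted_entries.extend(author_dict[author])
--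
--     return sorted_entries
-- ===== SOURCE B (Python) =====
-- def pigeonhole_sort(entries, authors):
--     pairs = sorted(zip(entries, authors), key=lambda p: p[1])
--     return [entry for entry, author in pairs]
-- ===== Notes on version B (the rewrite author's own statement) =====
-- stated objective: simpler
-- what changed: Replaced the dict-of-buckets grouping plus sorted-keys concatenation by a single stable sort of zip(entries, authors) keyed on the author alone; stability reproduces A's bucket order exactly.
import Mathlib
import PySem

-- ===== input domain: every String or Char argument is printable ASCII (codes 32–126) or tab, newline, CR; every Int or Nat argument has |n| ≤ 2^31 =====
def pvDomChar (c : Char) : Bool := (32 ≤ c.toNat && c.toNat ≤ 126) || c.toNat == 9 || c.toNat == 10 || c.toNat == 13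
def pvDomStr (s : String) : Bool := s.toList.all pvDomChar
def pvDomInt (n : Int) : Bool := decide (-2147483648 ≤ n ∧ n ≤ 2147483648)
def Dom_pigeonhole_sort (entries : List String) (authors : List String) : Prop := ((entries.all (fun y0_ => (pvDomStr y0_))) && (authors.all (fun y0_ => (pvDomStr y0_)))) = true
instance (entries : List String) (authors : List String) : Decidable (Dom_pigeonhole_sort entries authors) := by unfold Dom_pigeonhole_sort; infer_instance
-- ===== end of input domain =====

-- B replaces A's dict-of-buckets grouping + sorted-keys concatenation by one stable sort of
-- zip(entries, authors) keyed on the author alone (objective: simpler).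

-- ===== PORT A =====
-- dict grouping loop: `if author not in d: d[author] = []` then `d[author].append(entry)`
-- (the append is Dict.modify — the key is always present at that point, so modify is exact);
-- then extend over sorted keys.  `author_dict[author]` in the output loop is getD: the key is
-- always present (it comes from the dict's own keys), so getD is exact there too.
def pigeonhole_sort (entries : List String) (authors : List String) : List String :=
  let author_dict : PySem.Dict String (List String) :=
    (entries.zip authors).foldl
      (fun d p =>
        (if d.contains p.2 = true then d else d.insert p.2 []).modify p.2 [] (fun l => l ++ [p.1]))
      PySem.Dict.empty
  (PySem.List.sorted author_dict.keys (fun k => k) false).foldl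
    (fun acc a => acc ++ author_dict.getD a []) []

-- ===== PORT B =====
-- pairs = sorted(zip(entries, authors), key=lambda p: p[1]); return [entry for entry, _ in pairs]
def pigeonhole_sort_alt (entries : List String) (authors : List String) : List String :=
  (PySem.List.sorted (entries.zip authors) (fun p => p.2) false).map (fun p => p.1)

-- ===== PRECONDITION & SPEC =====
def Spec_pigeonhole_sort (entries : List String) (authors : List String) (out : List String) : Prop := out = pigeonhole_sort_alt entries authors
instance (entries : List String) (authors : List String) (out : List String) : Decidable (Spec_pigeonhole_sort entries authors out) := by unfold Spec_pigeonhole_sort; infer_instance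

-- ===== CLAIM (what is proved, stated in full; the proofs are below) =====
def Claim_equal_pigeonhole_sort : Prop := ∀ (entries : List String) (authors : List String), Dom_pigeonhole_sort entries authors → Spec_pigeonhole_sort entries authors (pigeonhole_sort entries authors)

-- ===== LEMMAS AND PROOFS =====

-- the comparator of B's stable sort on pairs
def pvBef (a b : String × String) : Bool := decide (a.2 < b.2)

-- concatenation of the per-key groups, in key order ks
def pvG (ks : List String) (ps : List (String × String)) : List (String × String) :=
  ks.flatMap (fun k => ps.filter (fun q => q.2 == k))

-- insert a key into a strictly increasing key list (skip if present)
def pvIns (a : String) : List String → List String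
  | [] => [a]
  | k :: ks => if a < k then a :: k :: ks else if a = k then k :: ks else k :: pvIns a ks

-- the sorted distinct keys of a list
def pvSK (l : List String) : List String :=
  PySem.List.sorted (PySem.Set.ofList l) (fun k => k) false

theorem mem_pvIns (a b : String) (ks : List String) : b ∈ pvIns a ks ↔ b = a ∨ b ∈ ks := by
  induction ks with
  | nil => simp [pvIns]
  | cons k ks ih =>
    simp only [pvIns]
    split_ifs with h1 h2
    · simp
    · subst h2; simp
    · simp [ih]; tauto

theorem pairwise_pvIns (a : String) (ks : List String) (h : ks.Pairwise (· < ·)) :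
    (pvIns a ks).Pairwise (· < ·) := by
  induction ks with
  | nil => simp [pvIns]
  | cons k ks ih =>
    rcases List.pairwise_cons.mp h with ⟨hk, ht⟩
    simp only [pvIns]
    split_ifs with h1 h2
    · exact List.pairwise_cons.mpr ⟨by
        intro x hx
        rcases List.mem_cons.mp hx with rfl | hx
        · exact h1
        · exact lt_trans h1 (hk x hx), h⟩
    · subst h2; exact h
    · have hka : k < a := lt_of_le_of_ne (le_of_not_gt h1) (Ne.symm h2)
      exact List.pairwise_cons.mpr ⟨by
        intro x hx
        rcases (mem_pvIns a x ks).mp hx with rfl | hx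
        · exact hka
        · exact hk x hx, ih ht⟩

theorem perm_pvIns (a : String) (ks : List String) (h : ks.Pairwise (· < ·)) :
    (pvIns a ks).Perm (if a ∈ ks then ks else ks ++ [a]) := by
  induction ks with
  | nil => simp [pvIns]
  | cons k ks ih =>
    rcases List.pairwise_cons.mp h with ⟨hk, ht⟩
    simp only [pvIns]
    by_cases h1 : a < k
    · have hna : a ∉ k :: ks := by
        intro hmem
        rcases List.mem_cons.mp hmem with rfl | hmem
        · exact absurd h1 (lt_irrefl a)
        · exact absurd (lt_trans h1 (hk a hmem)) (lt_irrefl a)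
      rw [if_pos h1, if_neg hna]
      exact (List.perm_append_singleton a (k :: ks)).symm
    · by_cases h2 : a = k
      · rw [if_neg h1, if_pos h2, if_pos (by simp [h2])]
      · rw [if_neg h1, if_neg h2]
        by_cases hm : a ∈ ks
        · rw [if_pos (by simp [hm])]
          have := ih ht
          rw [if_pos hm] at this
          exact List.Perm.cons k this
        · rw [if_neg (by simp [hm, h2])]
          have := ih ht
          rw [if_neg hm] at this
          exact List.Perm.cons k this

theorem pvSK_append (l : List String) (a : String) : pvSK (l ++ [a]) = pvIns a (pvSK l) := by
  have hof : PySem.Set.ofList (l ++ [a]) = PySem.Set.add (PySem.Set.ofList l) a := by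
    simp [PySem.Set.ofList, List.foldl_append]
  have hpw : (pvSK l).Pairwise (· < ·) := PySem.List.sorted_ofList_pairwise_lt l
  have hmemiff : a ∈ pvSK l ↔ a ∈ PySem.Set.ofList l := by
    simp [pvSK, PySem.List.mem_sorted]
  have hperm : (pvIns a (pvSK l)).Perm (PySem.Set.ofList (l ++ [a])) := by
    rw [hof]
    by_cases hm : a ∈ PySem.Set.ofList l
    · have h1 : PySem.Set.add (PySem.Set.ofList l) a = PySem.Set.ofList l := by
        simp [PySem.Set.add, hm]
      rw [h1]
      have := perm_pvIns a (pvSK l) hpw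
      rw [if_pos (hmemiff.mpr hm)] at this
      exact this.trans (PySem.List.sorted_perm _ _ _)
    · have h1 : PySem.Set.add (PySem.Set.ofList l) a = PySem.Set.ofList l ++ [a] := by
        simp [PySem.Set.add, hm]
      rw [h1]
      have := perm_pvIns a (pvSK l) hpw
      rw [if_neg (fun hx => hm (hmemiff.mp hx))] at this
      exact this.trans ((PySem.List.sorted_perm _ _ _).append_right [a])
  exact PySem.List.sorted_eq_of_perm_of_pairwise_lt _ _ _ hperm (pairwise_pvIns a _ hpw)

theorem insertBy_front (x : String × String) (l : List (String × String))
    (h : ∀ y ∈ l, pvBef x y = true) :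
    PySem.List.insertBy pvBef x l = x :: l := by
  cases l with
  | nil => simp [PySem.List.insertBy]
  | cons y ys => simp [PySem.List.insertBy, h y (by simp)]

theorem insertBy_skip (x : String × String) (l1 l2 : List (String × String))
    (h : ∀ y ∈ l1, pvBef x y = false) :
    PySem.List.insertBy pvBef x (l1 ++ l2) = l1 ++ PySem.List.insertBy pvBef x l2 := by
  induction l1 with
  | nil => simp
  | cons y ys ih =>
    simp only [List.cons_append, PySem.List.insertBy, h y (by simp)]
    simp only [Bool.false_eq_true, if_false, List.cons.injEq, true_and]
    exact ih (fun z hz => h z (by simp [hz]))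

theorem filter_filter_ne (k k' : String) (hne : k' ≠ k) (ps : List (String × String)) :
    (ps.filter (fun q => !(q.2 == k))).filter (fun q => q.2 == k') =
      ps.filter (fun q => q.2 == k') := by
  induction ps with
  | nil => rfl
  | cons p ps ih =>
    by_cases h : p.2 = k
    · have e1 : (!(p.2 == k)) = false := by simp [h]
      have e2 : (p.2 == k') = false := by
        simp only [beq_eq_false_iff_ne, ne_eq, h]
        exact fun hh => hne hh.symm
      simp [List.filter_cons, e1, e2, ih]
    · have e1 : (!(p.2 == k)) = true := by simp [h]
      simp [List.filter_cons, e1, ih]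

theorem pvG_cons (k : String) (ks : List String) (ps : List (String × String)) :
    pvG (k :: ks) ps = ps.filter (fun q => q.2 == k) ++ pvG ks ps := by
  simp [pvG]

theorem pvG_append_single (ks : List String) (ps : List (String × String)) (p : String × String)
    (h : ∀ k ∈ ks, k ≠ p.2) : pvG ks (ps ++ [p]) = pvG ks ps := by
  induction ks with
  | nil => rfl
  | cons k ks ih =>
    rw [pvG_cons, pvG_cons, ih (fun k' hk' => h k' (by simp [hk']))]
    have : (p.2 == k) = false := by
      simpa using (h k (by simp)).symm
    simp [List.filter_append, List.filter, this]

theorem pvG_filter_ne (ks : List String) (k : String) (ps : List (String × String))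
    (h : ∀ k' ∈ ks, k' ≠ k) :
    pvG ks (ps.filter (fun q => !(q.2 == k))) = pvG ks ps := by
  induction ks with
  | nil => rfl
  | cons k' ks ih =>
    rw [pvG_cons, pvG_cons, ih (fun x hx => h x (by simp [hx])),
      filter_filter_ne k k' (h k' (by simp))]

-- the heart of the proof: inserting one pair into the grouped list extends its key's group
theorem pvG_insertBy (ks : List String) (ps : List (String × String)) (p : String × String)
    (hpw : ks.Pairwise (· < ·)) (hmem : ∀ q ∈ ps, q.2 ∈ ks) :
    PySem.List.insertBy pvBef p (pvG ks ps) = pvG (pvIns p.2 ks) (ps ++ [p]) := by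
  induction ks generalizing ps with
  | nil =>
    have hps : ps.filter (fun q => q.2 == p.2) = [] := by
      rw [List.filter_eq_nil_iff]
      intro q hq; exact absurd (hmem q hq) (List.not_mem_nil)
    simp [pvG, pvIns, PySem.List.insertBy, List.filter_append, hps]
  | cons k ks ih =>
    rcases List.pairwise_cons.mp hpw with ⟨hk, ht⟩
    have hfk : ∀ y ∈ ps.filter (fun q => q.2 == k), y.2 = k := by
      intro y hy
      have := List.of_mem_filter hy
      simpa using this
    have hGks : ∀ y ∈ pvG ks ps, k < y.2 := by
      intro y hy
      rcases List.mem_flatMap.mp hy with ⟨k', hk', hy'⟩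
      have : y.2 = k' := by simpa using List.of_mem_filter hy'
      exact this ▸ hk k' hk'
    simp only [pvIns]
    rcases lt_trichotomy p.2 k with h1 | h1 | h1
    · -- new least key: p goes in front
      have hfront : ∀ y ∈ ps.filter (fun q => q.2 == k) ++ pvG ks ps, pvBef p y = true := by
        intro y hy
        rcases List.mem_append.mp hy with hy | hy
        · simp [pvBef, hfk y hy, h1]
        · simp [pvBef, lt_trans h1 (hGks y hy)]
      have hne : ∀ q ∈ ps, (q.2 == p.2) = false := by
        intro q hq
        have hlt : p.2 < q.2 := by
          rcases List.mem_cons.mp (hmem q hq) with hh | hh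
          · rw [hh]; exact h1
          · exact lt_trans h1 (hk _ hh)
        simp only [beq_eq_false_iff_ne, ne_eq]
        exact fun he => absurd (he ▸ hlt) (lt_irrefl _)
      have hps : ps.filter (fun q => q.2 == p.2) = [] := List.filter_eq_nil_iff.mpr
        (by intro q hq; simpa using hne q hq)
      rw [if_pos h1, pvG_cons, insertBy_front p _ hfront, pvG_cons, pvG_cons]
      have hkne : (p.2 == k) = false := by
        simpa using fun he => absurd (he ▸ h1) (lt_irrefl _)
      have hGsame : pvG ks (ps ++ [p]) = pvG ks ps :=
        pvG_append_single ks ps p (fun k' hk' he => absurd (he ▸ lt_trans h1 (hk k' hk')) (lt_irrefl _))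
      simp [List.filter_append, List.filter, hps, hkne, hGsame]
    · -- p's key is already the head key: p goes at the end of the head group
      rw [if_neg (by simp [h1]), if_pos h1]
      have hskip : ∀ y ∈ ps.filter (fun q => q.2 == k), pvBef p y = false := by
        intro y hy; simp [pvBef, hfk y hy, h1]
      have hfront : ∀ y ∈ pvG ks ps, pvBef p y = true := by
        intro y hy; simp [pvBef, h1 ▸ hGks y hy]
      rw [pvG_cons, insertBy_skip p _ _ hskip, insertBy_front p _ hfront, pvG_cons]
      have hGsame : pvG ks (ps ++ [p]) = pvG ks ps := by
        apply pvG_append_single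
        intro k' hk' he
        have hlt := hk k' hk'
        rw [he, h1] at hlt
        exact absurd hlt (lt_irrefl _)
      have hkp : (p.2 == k) = true := by simp [h1]
      simp [List.filter_append, List.filter, hkp, hGsame]
    · -- p's key is larger: skip the head group and recurse
      rw [if_neg (by simp [not_lt_of_gt h1]), if_neg (fun he => absurd (he ▸ h1) (lt_irrefl _))]
      have hskip : ∀ y ∈ ps.filter (fun q => q.2 == k), pvBef p y = false := by
        intro y hy; simp [pvBef, hfk y hy, not_lt_of_gt h1]
      rw [pvG_cons, insertBy_skip p _ _ hskip]
      have hkane : ∀ k' ∈ ks, k' ≠ k := by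
        intro k' hk' he; exact absurd (he ▸ hk k' hk') (lt_irrefl _)
      have hrw : pvG ks ps = pvG ks (ps.filter (fun q => !(q.2 == k))) :=
        (pvG_filter_ne ks k ps hkane).symm
      have hmem' : ∀ q ∈ ps.filter (fun q => !(q.2 == k)), q.2 ∈ ks := by
        intro q hq
        rcases List.mem_filter.mp hq with ⟨hq1, hq2⟩
        rcases List.mem_cons.mp (hmem q hq1) with hh | hh
        · exfalso; simp [hh] at hq2
        · exact hh
      rw [hrw, ih (ps.filter (fun q => !(q.2 == k))) ht hmem']
      have hkins : ∀ k' ∈ pvIns p.2 ks, k' ≠ k := by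
        intro k' hk' he
        rcases (mem_pvIns _ _ _).mp hk' with rfl | hh
        · exact absurd (he ▸ h1) (lt_irrefl _)
        · exact hkane k' hh he
      rw [pvG_cons]
      have hkp : (p.2 == k) = false := by
        simpa using fun he => absurd (he ▸ h1) (lt_irrefl _)
      have hG1 : pvG (pvIns p.2 ks) (ps.filter (fun q => !(q.2 == k)) ++ [p]) =
          pvG (pvIns p.2 ks) (ps ++ [p]) := by
        have e1 : pvG (pvIns p.2 ks) (ps.filter (fun q => !(q.2 == k)) ++ [p]) =
            pvG (pvIns p.2 ks) ((ps ++ [p]).filter (fun q => !(q.2 == k))) := by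
          congr 1
          simp [List.filter_append, List.filter, hkp]
        rw [e1, pvG_filter_ne _ k _ hkins]
      rw [hG1]
      simp [List.filter_append, List.filter, hkp]

-- B's stable sort equals the grouped concatenation over the sorted distinct keys
theorem sorted_eq_pvG (ps : List (String × String)) :
    PySem.List.sorted ps (fun p => p.2) false = pvG (pvSK (ps.map (fun q => q.2))) ps := by
  induction ps using List.reverseRecOn with
  | nil => simp [pvG, pvSK, PySem.List.sorted, PySem.Set.ofList, PySem.Set.empty]
  | append_singleton ps p ih =>
    have hfold := PySem.List.sorted_eq_foldl_insertBy (ps ++ [p]) (fun q : String × String => q.2)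
    rw [List.foldl_append] at hfold
    have hfold2 := PySem.List.sorted_eq_foldl_insertBy ps (fun q : String × String => q.2)
    rw [hfold, ← hfold2]
    have hbef : (fun a b : String × String => decide (a.2 < b.2)) = pvBef := rfl
    simp only [List.foldl_cons, List.foldl_nil, hbef]
    rw [ih]
    have hpw : (pvSK (ps.map (fun q => q.2))).Pairwise (· < ·) :=
      PySem.List.sorted_ofList_pairwise_lt _
    have hmem : ∀ q ∈ ps, q.2 ∈ pvSK (ps.map (fun q => q.2)) := by
      intro q hq
      have h2 : q.2 ∈ ps.map (fun q => q.2) :=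
        List.mem_map_of_mem (f := fun q : String × String => q.2) hq
      simpa [pvSK, PySem.List.mem_sorted, PySem.Set.mem_ofList] using h2
    rw [pvG_insertBy _ _ _ hpw hmem, List.map_append]
    have hmapp : (List.map (fun q : String × String => q.2) [p]) = [p.2] := rfl
    rw [hmapp, pvSK_append]

-- A's bucket-update step is a plain Dict.modify
theorem stepA_eq (d : PySem.Dict String (List String)) (a : String) (f : List String → List String) :
    (if d.contains a = true then d else d.insert a []).modify a [] f = d.modify a [] f := by
  by_cases h : d.contains a = true
  · rw [if_pos h]
  · rw [if_neg h]
    have hc : d.contains a = false := by simpa using h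
    have h0 : d.getD a [] = [] := PySem.Dict.getD_of_not_contains d [] hc
    simp only [PySem.Dict.modify, PySem.Dict.getD_insert_self, PySem.Dict.insert_insert_self, h0]

def pvDict (ps : List (String × String)) : PySem.Dict String (List String) :=
  ps.foldl (fun d q => d.modify q.2 [] (fun l => l ++ [q.1])) PySem.Dict.empty

theorem foldA_eq (ps : List (String × String)) :
    ps.foldl (fun d p =>
        (if d.contains p.2 = true then d else d.insert p.2 []).modify p.2 [] (fun l => l ++ [p.1]))
      PySem.Dict.empty = pvDict ps := by
  unfold pvDict
  congr 1
  funext d p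
  exact stepA_eq d p.2 (fun l => l ++ [p.1])

theorem pvDict_getD (ps : List (String × String)) (c : String) :
    (pvDict ps).getD c [] = (ps.filter (fun q => q.2 == c)).map (fun q => q.1) := by
  have hswap : pvDict ps =
      (ps.map Prod.swap).foldl (fun d p => d.modify p.1 [] (fun l => l ++ [p.2]))
        PySem.Dict.empty := by
    rw [List.foldl_map]; rfl
  rw [hswap, PySem.Dict.getD_foldl_modify_append, PySem.Dict.getD_empty]
  rw [List.filter_map]
  simp [List.map_map, Function.comp_def, Prod.swap]

theorem pvDict_keys (ps : List (String × String)) :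
    (pvDict ps).keys = PySem.Set.ofList (ps.map (fun q => q.2)) := by
  unfold pvDict
  have := PySem.Dict.keys_foldl_modify_key ps (fun q : String × String => q.2) ([] : List String)
    (fun _ q => fun l => l ++ [q.1]) PySem.Dict.empty
  rw [this, PySem.Dict.keys_empty]
  rfl

-- ===== VERDICT (by name: the statement is the Claim_ definition above) =====
theorem pigeonhole_sort_spec : Claim_equal_pigeonhole_sort := by
  intro entries authors _
  show pigeonhole_sort entries authors = pigeonhole_sort_alt entries authors
  unfold pigeonhole_sort pigeonhole_sort_alt
  simp only [foldA_eq]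
  rw [pvDict_keys, PySem.List.foldl_append_eq_flatMap, List.nil_append]
  have h1 : (PySem.List.sorted (PySem.Set.ofList ((entries.zip authors).map (fun q => q.2)))
      (fun k => k) false).flatMap (fun a => (pvDict (entries.zip authors)).getD a []) =
      (pvSK ((entries.zip authors).map (fun q => q.2))).flatMap
        (fun k => ((entries.zip authors).filter (fun q => q.2 == k)).map (fun q => q.1)) := by
    unfold pvSK
    congr 1
    funext k
    exact pvDict_getD (entries.zip authors) k
  rw [h1, ← List.map_flatMap]
  rw [sorted_eq_pvG]
  rfl
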